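-- pv_equiv track=rewrite | github.com/RissRossApplesauce/DKC3 | 2016/Anagram.py | solve
-- ===== SOURCE A (Python) =====
-- import functools as ft, itertools as it, operator as op, collections as co, cmath, math, re, traceback, copy
--
-- def solve(x, n):
--     # this is the original solution we came up with, but there is an easier one called bettersolve(x, n) below
--     x = x.strip('\n').split('\n')
--     unique = 0
--
--     counters = []
--     # use collections.Counter to count up all of the letters, after filtering out all of the non-letter characters
--     for sentence in x:
--         sentence = str([letter for letter in sentence if letter.isalpha()]).lower()
--         c = co.Counter(sentence)
--         counters.append(c)
--
--     # this loop looks through the counters and counts up the duplicated sentences. it adds to unique every time it finds an anagram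
--     while len(counters) > 1:
--         number = 0
--         j = 1
--         while j < len(counters):
--             if counters[0] == counters[j]:
--                 number += 1
--                 counters.pop(j)
--                 j -=1
--             j += 1
--         if number > 0:
--             unique += 1
--         counters.pop(0)
--
--     return unique
-- ===== SOURCE B (Python) =====
-- def solve(x, n):
--     # sort canonical anagram keys once, then count runs of length >= 2 in one linear pass
--     keys = sorted(tuple(sorted(ch.lower() for ch in s if ch.isalpha())) for s in x.strip('\n').split('\n'))
--     groups = 0
--     i = 0
--     while i < len(keys):
--         j = i
--         while j < len(keys) and keys[j] == keys[i]:
--             j += 1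
--         if j - i >= 2:
--             groups += 1
--         i = j
--     return groups
-- ===== Notes on version B (the rewrite author's own statement) =====
-- stated objective: alternative
-- what changed: Replaces per-sentence Counter dictionaries compared by repeated quadratic pop-based pairwise elimination with one canonical sorted-letter key per sentence, a single global sort of the keys, and one linear run-scan counting runs of length >= 2.
import Mathlib
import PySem

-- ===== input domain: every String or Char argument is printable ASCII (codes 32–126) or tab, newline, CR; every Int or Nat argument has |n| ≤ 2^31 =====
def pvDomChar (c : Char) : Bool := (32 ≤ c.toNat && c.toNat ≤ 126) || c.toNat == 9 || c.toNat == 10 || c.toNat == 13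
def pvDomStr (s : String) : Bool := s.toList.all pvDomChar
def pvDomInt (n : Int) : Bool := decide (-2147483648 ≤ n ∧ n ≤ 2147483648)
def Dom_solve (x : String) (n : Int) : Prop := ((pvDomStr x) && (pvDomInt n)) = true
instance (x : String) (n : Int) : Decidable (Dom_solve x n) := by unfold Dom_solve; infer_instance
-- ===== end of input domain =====

-- B replaces A's pop-based pairwise Counter elimination by canonical sorted-letter keys,
-- one global sort and a linear run-scan over equal-key runs (objective: alternative algorithm).

-- ===== PORT A =====

-- hand port of Python str(<list of one-char strings>): "['a', 'b']"; exact for lists of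
-- single alphabetic characters (no repr escaping is ever needed for those)
def pyReprBody : List Char → List Char
  | [] => [']']
  | c :: rest => ',' :: ' ' :: '\'' :: c :: '\'' :: pyReprBody rest

def pyRepr : List Char → List Char
  | [] => ['[', ']']
  | c :: rest => '[' :: '\'' :: c :: '\'' :: pyReprBody rest

-- sentence = str([letter for letter in sentence if letter.isalpha()]).lower(); c = Counter(sentence)
def counterOf (s : List Char) : PySem.Dict Char Int :=
  PySem.Dict.counter (PySem.Chars.lower (pyRepr (s.filter PySem.Chars.isalpha)))

-- Python '==' on dicts/Counters built here: same key set, same value at every key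
def dictEq (d1 d2 : PySem.Dict Char Int) : Bool :=
  PySem.Set.equal d1.keys d2.keys && d1.keys.all (fun k => d1.getD k 0 == d2.getD k 0)

-- the inner while loop: scan counters[1:], count matches of counters[0] and pop them
def innerA (c : PySem.Dict Char Int) : List (PySem.Dict Char Int) → Int × List (PySem.Dict Char Int)
  | [] => (0, [])
  | d :: ds =>
    if dictEq c d then
      let r := innerA c ds
      (r.1 + 1, r.2)
    else
      let r := innerA c ds
      (r.1, d :: r.2)

lemma innerA_len (c : PySem.Dict Char Int) (l : List (PySem.Dict Char Int)) :
    (innerA c l).2.length ≤ l.length := by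
  induction l with
  | nil => simp [innerA]
  | cons d ds ih =>
    simp only [innerA]
    split <;> simp <;> omega

-- the outer while loop: while len(counters) > 1: …; pop(0)
def outerA : List (PySem.Dict Char Int) → Int
  | [] => 0
  | [_] => 0
  | c :: d :: rest =>
    let r := innerA c (d :: rest)
    (if r.1 > 0 then 1 else 0) + outerA r.2
termination_by l => l.length
decreasing_by
  have h := innerA_len c (d :: rest)
  simp at h ⊢
  omega

def solve (x : String) (n : Int) : Int :=
  -- x = x.strip('\n').split('\n')   (separator is non-empty, so split? is always `some`)
  let xs := (PySem.Chars.split? (PySem.Chars.stripChars x.toList ['\n']) ['\n']).getD []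
  let counters := xs.map counterOf
  outerA counters

-- ===== PORT B =====

-- tuple(sorted(ch.lower() for ch in s if ch.isalpha()))
def keyOf (s : List Char) : List Char :=
  PySem.List.sorted ((s.filter PySem.Chars.isalpha).map PySem.Chars.lowerChar) (fun c => c) false

-- the two-pointer run scan over the sorted key list: j advances over the run of keys[i]
def runScan : List (List Char) → Int
  | [] => 0
  | k :: rest =>
    let run := rest.takeWhile (fun y => y == k)
    let rest' := rest.dropWhile (fun y => y == k)
    (if (1 + (run.length : Int)) ≥ 2 then 1 else 0) + runScan rest'
termination_by l => l.length
decreasing_by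
  have h := List.length_dropWhile_le (fun y => y == k) rest
  simp at h ⊢
  omega

def solve_alt (x : String) (n : Int) : Int :=
  let xs := (PySem.Chars.split? (PySem.Chars.stripChars x.toList ['\n']) ['\n']).getD []
  let keys := xs.map keyOf
  runScan (@PySem.List.sorted (List Char) (List Char)
    List.instLinearOrder.toLT LinearOrder.toDecidableLT keys (fun k => k) false)

-- ===== PRECONDITION & SPEC =====
def Spec_solve (x : String) (n : Int) (out : Int) : Prop := out = solve_alt x n
instance (x : String) (n : Int) (out : Int) : Decidable (Spec_solve x n out) := by unfold Spec_solve; infer_instance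

-- ===== CLAIM (what is proved, stated in full; the proofs are below) =====
def Claim_equal_solve : Prop := ∀ (x : String) (n : Int), Dom_solve x n → Spec_solve x n (solve x n)

-- ===== LEMMAS AND PROOFS =====

-- abstract group counter: gs l = number of distinct keys occurring at least twice in l
def gs : List (List Char) → Int
  | [] => 0
  | k :: rest =>
    (if 0 < rest.count k then 1 else 0) + gs (rest.filter (fun y => y ≠ k))
termination_by l => l.length
decreasing_by
  simp only [List.length_unattach, List.length_cons, Order.lt_add_one_iff]
  simp only [← List.countP_eq_length_filter]
  calc List.countP (fun (x : {y // y ∈ rest}) => decide ((x : List Char) ≠ k)) rest.attach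
      ≤ rest.attach.length :=
        List.countP_le_length
    _ = rest.length := List.length_attach

-- distinct-keys-with-multiplicity-≥-2 count, the common value of both loops
def N (l : List (List Char)) : Int :=
  ((PySem.List.dedup l).countP (fun x => 2 ≤ l.count x) : Int)

lemma count_pyReprBody (x : Char) (l : List Char) :
    (pyReprBody l).count x = l.count x + (if ']' = x then 1 else 0)
      + (if '\'' = x then 2 * l.length else 0) + (if ',' = x then l.length else 0)
      + (if ' ' = x then l.length else 0) := by
  induction l with
  | nil => simp [pyReprBody, List.count_cons]
  | cons c rest ih =>
    simp only [pyReprBody, List.count_cons, ih, List.length_cons]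
    split_ifs <;> simp_all <;> omega

lemma count_pyRepr (x : Char) (l : List Char) :
    (pyRepr l).count x = l.count x + (if '[' = x then 1 else 0) + (if ']' = x then 1 else 0)
      + (if '\'' = x then 2 * l.length else 0) + (if ',' = x then l.length - 1 else 0)
      + (if ' ' = x then l.length - 1 else 0) := by
  match l with
  | [] => simp [pyRepr, List.count_cons]; split_ifs <;> simp_all
  | c :: rest =>
    simp only [pyRepr, List.count_cons, count_pyReprBody, List.length_cons]
    split_ifs <;> simp_all <;> omega

lemma islower_not_special (c : Char) (h : PySem.Chars.islower c = true) :
    c ≠ '[' ∧ c ≠ ']' ∧ c ≠ '\'' ∧ c ≠ ',' ∧ c ≠ ' ' := by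
  simp only [PySem.Chars.islower, Bool.and_eq_true, decide_eq_true_eq] at h
  obtain ⟨h1, h2⟩ := h
  refine ⟨?_, ?_, ?_, ?_, ?_⟩ <;> rintro rfl <;> simp_all [Char.le_def]

lemma pyRepr_perm_iff (l1 l2 : List Char)
    (h1 : ∀ c ∈ l1, PySem.Chars.islower c = true)
    (h2 : ∀ c ∈ l2, PySem.Chars.islower c = true) :
    (pyRepr l1).Perm (pyRepr l2) ↔ l1.Perm l2 := by
  constructor
  · intro h
    have hc := List.perm_iff_count.mp h
    have hq1 : l1.count '\'' = 0 :=
      List.count_eq_zero.mpr (fun hm => (islower_not_special _ (h1 _ hm)).2.2.1 rfl)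
    have hq2 : l2.count '\'' = 0 :=
      List.count_eq_zero.mpr (fun hm => (islower_not_special _ (h2 _ hm)).2.2.1 rfl)
    have hq := hc '\''
    rw [count_pyRepr, count_pyRepr, hq1, hq2] at hq
    simp at hq
    have hlen : l1.length = l2.length := by omega
    refine List.perm_iff_count.mpr (fun a => ?_)
    have ha := hc a
    rw [count_pyRepr, count_pyRepr, hlen] at ha
    omega
  · intro h
    have hlen := h.length_eq
    refine List.perm_iff_count.mpr (fun a => ?_)
    rw [count_pyRepr, count_pyRepr, List.perm_iff_count.mp h a, hlen]

lemma lower_pyReprBody (l : List Char) :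
    PySem.Chars.lower (pyReprBody l) = pyReprBody (l.map PySem.Chars.lowerChar) := by
  induction l with
  | nil => rfl
  | cons c rest ih =>
    simp only [pyReprBody, PySem.Chars.lower, List.map_cons] at ih ⊢
    simp [ih]
    decide

lemma lower_pyRepr (l : List Char) :
    PySem.Chars.lower (pyRepr l) = pyRepr (l.map PySem.Chars.lowerChar) := by
  match l with
  | [] => rfl
  | c :: rest =>
    have hb := lower_pyReprBody rest
    simp only [pyRepr, PySem.Chars.lower, List.map_cons] at hb ⊢
    simp [hb]
    decide

lemma islower_lowerChar (c : Char) (h : PySem.Chars.isalpha c = true) :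
    PySem.Chars.islower (PySem.Chars.lowerChar c) = true := by
  simp only [PySem.Chars.isalpha, PySem.Chars.isupper, PySem.Chars.islower,
    Bool.or_eq_true, Bool.and_eq_true, decide_eq_true_eq] at h
  unfold PySem.Chars.lowerChar PySem.Chars.isupper
  rcases h with ⟨h1, h2⟩ | ⟨h1, h2⟩
  · have hA : 65 ≤ c.toNat := by simpa [Char.le_def, UInt32.le_iff_toNat_le] using h1
    have hZ : c.toNat ≤ 90 := by simpa [Char.le_def, UInt32.le_iff_toNat_le] using h2
    have hv : (c.toNat + 32).isValidChar := Or.inl (by omega)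
    have ht : (Char.ofNat (c.toNat + 32)).toNat = c.toNat + 32 := by
      rw [Char.toNat_ofNat, if_pos hv]
    rw [if_pos (by simpa [Char.le_def, UInt32.le_iff_toNat_le] using And.intro h1 h2 :
      (decide ('A' ≤ c) && decide (c ≤ 'Z')) = true)]
    simp only [PySem.Chars.islower, Bool.and_eq_true, decide_eq_true_eq, Char.le_def,
      UInt32.le_iff_toNat_le]
    have ht' : (Char.ofNat (c.toNat + 32)).val.toNat = c.toNat + 32 := ht
    refine ⟨?_, ?_⟩
    · rw [show ('a').val.toNat = 97 from rfl, ht']; omega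
    · rw [show ('z').val.toNat = 122 from rfl, ht']; omega
  · have hno : ¬ ((decide ('A' ≤ c) && decide (c ≤ 'Z')) = true) := by
      simp only [Bool.and_eq_true, decide_eq_true_eq, Char.le_def, UInt32.le_iff_toNat_le]
      rintro ⟨-, hb⟩
      have ha : 97 ≤ c.toNat := by simpa [Char.le_def, UInt32.le_iff_toNat_le] using h1
      have hz : c.toNat ≤ 90 := by simpa using hb
      omega
    rw [if_neg hno]
    simp only [PySem.Chars.islower, Bool.and_eq_true, decide_eq_true_eq]
    exact ⟨h1, h2⟩

lemma dictEq_counter_iff (u v : List Char) :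
    dictEq (PySem.Dict.counter u) (PySem.Dict.counter v) = true ↔ u.Perm v := by
  constructor
  · intro h
    simp only [dictEq, Bool.and_eq_true, List.all_eq_true, PySem.Dict.keys_counter] at h
    obtain ⟨he, hall⟩ := h
    have hmem := (PySem.Set.equal_iff _ _).mp he
    refine List.perm_iff_count.mpr (fun a => ?_)
    by_cases hmu : a ∈ u
    · have hk : a ∈ PySem.Set.ofList u := (PySem.Set.mem_ofList _ _).mpr hmu
      have hv := hall _ hk
      simp only [PySem.Dict.getD_counter, beq_iff_eq, Nat.cast_inj] at hv
      exact hv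
    · have hmv : a ∉ v := fun hv =>
        hmu ((PySem.Set.mem_ofList _ _).mp ((hmem a).mpr ((PySem.Set.mem_ofList _ _).mpr hv)))
      rw [List.count_eq_zero.mpr hmu, List.count_eq_zero.mpr hmv]
  · intro h
    simp only [dictEq, Bool.and_eq_true, List.all_eq_true, PySem.Dict.keys_counter]
    refine ⟨(PySem.Set.equal_iff _ _).mpr (fun x => by
      simp only [PySem.Set.mem_ofList]; exact h.mem_iff), fun k _ => ?_⟩
    simp only [PySem.Dict.getD_counter, beq_iff_eq, Nat.cast_inj]
    exact List.perm_iff_count.mp h k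

lemma dictEq_counterOf_iff (s t : List Char) :
    dictEq (counterOf s) (counterOf t) = true ↔ keyOf s = keyOf t := by
  have hlow : ∀ (w : List Char) (c : Char),
      c ∈ (w.filter PySem.Chars.isalpha).map PySem.Chars.lowerChar →
      PySem.Chars.islower c = true := by
    intro w c hc
    obtain ⟨c', hc', rfl⟩ := List.mem_map.mp hc
    exact islower_lowerChar c' (List.of_mem_filter hc')
  unfold counterOf keyOf
  rw [dictEq_counter_iff, lower_pyRepr, lower_pyRepr,
    pyRepr_perm_iff _ _ (hlow s) (hlow t)]
  exact (PySem.List.sorted_id_eq_sorted_id_iff_perm _ _).symm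

lemma innerA_spec (c : PySem.Dict Char Int) (l : List (PySem.Dict Char Int)) :
    innerA c l = ((l.countP (fun d => dictEq c d) : Int), l.filter (fun d => !dictEq c d)) := by
  induction l with
  | nil => simp [innerA]
  | cons d ds ih =>
    simp only [innerA, ih, List.countP_cons, List.filter_cons]
    by_cases hd : dictEq c d <;> simp [hd]

lemma dictEq_counterOf_beq (s t : List Char) :
    dictEq (counterOf s) (counterOf t) = (keyOf s == keyOf t) := by
  by_cases h : keyOf s = keyOf t
  · simp only [h, BEq.rfl]
    exact (dictEq_counterOf_iff s t).mpr h
  · rw [beq_eq_false_iff_ne.mpr h]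
    exact Bool.eq_false_iff.mpr (fun hh => h ((dictEq_counterOf_iff s t).mp hh))

lemma outerA_map_aux : ∀ (n : Nat) (xs : List (List Char)), xs.length ≤ n →
    outerA (xs.map counterOf) = gs (xs.map keyOf) := by
  intro n
  induction n with
  | zero =>
    intro xs h
    rw [List.length_eq_zero_iff.mp (Nat.le_zero.mp h)]
    simp [outerA, gs]
  | succ n ih =>
    intro xs hle
    match xs with
    | [] => simp [outerA, gs]
    | [s] => simp [outerA, gs]
    | s :: t :: r =>
      rw [List.map_cons, List.map_cons, List.map_cons, List.map_cons]
      rw [show ∀ (c d : PySem.Dict Char Int) (rest : List (PySem.Dict Char Int)),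
            outerA (c :: d :: rest) =
              (if (innerA c (d :: rest)).1 > 0 then 1 else 0) + outerA (innerA c (d :: rest)).2
          from fun c d rest => by rw [outerA]]
      rw [gs, innerA_spec]
      have hbq : (fun u => dictEq (counterOf s) (counterOf u)) =
          (fun u => keyOf u == keyOf s) := by
        funext u
        rw [dictEq_counterOf_beq]
        by_cases h : keyOf u = keyOf s
        · rw [h]
        · rw [beq_eq_false_iff_ne.mpr (fun hh => h hh.symm), beq_eq_false_iff_ne.mpr h]
      have hcount : List.countP (fun d => dictEq (counterOf s) d)
            (counterOf t :: List.map counterOf r)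
          = List.count (keyOf s) (keyOf t :: List.map keyOf r) := by
        show List.countP _ (List.map counterOf (t :: r)) = List.count _ (List.map keyOf (t :: r))
        rw [List.countP_map, List.count_eq_countP, List.countP_map]
        exact congrFun (congrArg List.countP hbq) (t :: r)
      have hfilt : List.filter (fun d => !dictEq (counterOf s) d)
            (counterOf t :: List.map counterOf r)
          = List.map counterOf ((t :: r).filter (fun u => decide (keyOf u ≠ keyOf s))) := by
        show List.filter _ (List.map counterOf (t :: r)) = _
        rw [List.filter_map]
        simp only [Function.comp_def]
        congr 1
        apply List.filter_congr
        intro u _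
        rw [dictEq_counterOf_beq]
        by_cases h : keyOf u = keyOf s
        · simp [h]
        · rw [beq_eq_false_iff_ne.mpr (fun hh => h hh.symm)]
          simp [h]
      have hfiltB : List.filter (fun y => decide (y ≠ keyOf s)) (keyOf t :: List.map keyOf r)
          = List.map keyOf ((t :: r).filter (fun u => decide (keyOf u ≠ keyOf s))) := by
        show List.filter _ (List.map keyOf (t :: r)) = _
        rw [List.filter_map]
        simp only [Function.comp_def]
      have hlen' : ((t :: r).filter (fun u => decide (keyOf u ≠ keyOf s))).length ≤ n := by
        have h1 := List.length_filter_le (fun u => decide (keyOf u ≠ keyOf s)) (t :: r)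
        simp only [List.length_cons] at h1 hle ⊢
        omega
      simp only [hcount, hfilt, hfiltB, ih _ hlen', gt_iff_lt, Nat.cast_pos]

lemma outerA_map (xs : List (List Char)) : outerA (xs.map counterOf) = gs (xs.map keyOf) := by
  exact outerA_map_aux xs.length xs le_rfl

lemma discard_ofList (k : List Char) (xs : List (List Char)) :
    PySem.Set.discard (PySem.Set.ofList xs) k = PySem.Set.ofList (xs.filter (fun y => y ≠ k)) := by
  induction xs with
  | nil => rfl
  | cons x xs ih =>
    rw [PySem.Set.ofList_cons]
    by_cases hx : x = k
    · subst hx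
      show List.filter _ (x :: List.filter _ _) = _
      rw [List.filter_cons_of_neg (by simp), List.filter_filter]
      have : (List.filter (fun y => !y == x && !y == x) (PySem.Set.ofList xs))
          = PySem.Set.discard (PySem.Set.ofList xs) x := by
        show _ = List.filter _ _
        apply List.filter_congr
        intro y _
        cases hyx : (y == x) <;> simp
      rw [this, ih]
      congr 1
      rw [List.filter_cons_of_neg (by simp)]
    · show List.filter _ (x :: List.filter _ _) = _
      rw [List.filter_cons_of_pos (by simpa using fun h => hx h),
        List.filter_filter]
      have hcomm : (List.filter (fun y => !y == k && !y == x) (PySem.Set.ofList xs))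
          = List.filter (fun y => !y == x) (List.filter (fun y => !y == k) (PySem.Set.ofList xs)) := by
        rw [List.filter_filter]
        apply List.filter_congr
        intro y _
        cases h1 : (y == k) <;> cases h2 : (y == x) <;> simp
      rw [hcomm]
      have ihe : (List.filter (fun y => !y == k) (PySem.Set.ofList xs))
          = PySem.Set.ofList (xs.filter (fun y => y ≠ k)) := ih
      rw [ihe, List.filter_cons_of_pos (by simpa using hx), PySem.Set.ofList_cons]
      rfl

lemma gs_eq_N_aux : ∀ (n : Nat) (l : List (List Char)), l.length ≤ n → gs l = N l := by
  intro n
  induction n with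
  | zero =>
    intro l h
    rw [List.length_eq_zero_iff.mp (Nat.le_zero.mp h)]
    simp [gs, N, PySem.List.dedup, PySem.Set.ofList]
  | succ n ih =>
    intro l hle
    match l with
    | [] => simp [gs, N, PySem.List.dedup, PySem.Set.ofList]
    | k :: rest =>
      rw [gs]
      unfold N PySem.List.dedup
      rw [PySem.Set.ofList_cons, discard_ofList, List.countP_cons]
      have hpk : (decide (2 ≤ (k :: rest).count k)) = decide (0 < rest.count k) := by
        simp only [decide_eq_decide, List.count_cons_self]
        omega
      have hcong : List.countP (fun x => decide (2 ≤ (k :: rest).count x))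
            (PySem.Set.ofList (rest.filter (fun y => y ≠ k)))
          = List.countP (fun x => decide (2 ≤ (rest.filter (fun y => y ≠ k)).count x))
            (PySem.Set.ofList (rest.filter (fun y => y ≠ k))) := by
        apply List.countP_congr
        intro x hx
        have hxk : x ≠ k := by
          have hm := (PySem.Set.mem_ofList _ _).mp hx
          exact of_decide_eq_true (List.mem_filter.mp hm).2
        have e1 : List.count x (k :: rest) = List.count x rest := by
          simp [Ne.symm hxk]
        rw [e1, List.count_filter (by simpa using hxk)]
      rw [hcong]
      have hlen' : (rest.filter (fun y => y ≠ k)).length ≤ n := by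
        have h1 := List.length_filter_le (fun y => decide (y ≠ k)) rest
        simp only [List.length_cons] at hle
        omega
      rw [ih _ hlen', hpk]
      unfold N PySem.List.dedup
      push_cast
      by_cases h : 0 < rest.count k
      · simp [h]
        omega
      · simp [h]

lemma gs_eq_N (l : List (List Char)) : gs l = N l :=
  gs_eq_N_aux l.length l le_rfl

lemma N_perm (l l' : List (List Char)) (h : l.Perm l') : N l = N l' := by
  unfold N PySem.List.dedup
  have hd : (PySem.Set.ofList l).Perm (PySem.Set.ofList l') := by
    refine (List.perm_ext_iff_of_nodup (PySem.Set.nodup_ofList _) (PySem.Set.nodup_ofList _)).mpr ?_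
    intro x
    simp only [PySem.Set.mem_ofList]
    exact h.mem_iff
  rw [List.countP_congr (fun x _ => by rw [h.count_eq] : ∀ x ∈ PySem.Set.ofList l,
    decide (2 ≤ l.count x) = true ↔ decide (2 ≤ l'.count x) = true)]
  rw [hd.countP_eq]

lemma takeWhile_dropWhile_sorted (k : List Char) (rest : List (List Char))
    (hk : ∀ y ∈ rest, k ≤ y) (hp : rest.Pairwise (fun a b => a ≤ b)) :
    (rest.takeWhile (fun y => y == k)).length = rest.count k ∧
      rest.dropWhile (fun y => y == k) = rest.filter (fun y => y ≠ k) := by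
  induction rest with
  | nil => simp
  | cons y t ih =>
    obtain ⟨hy, hp'⟩ := List.pairwise_cons.mp hp
    by_cases hyk : y = k
    · subst hyk
      have hk' : ∀ z ∈ t, y ≤ z := hy
      obtain ⟨ih1, ih2⟩ := ih hk' hp'
      refine ⟨?_, ?_⟩
      · rw [List.takeWhile_cons_of_pos (by simp), List.length_cons, ih1,
          List.count_cons_self]
      · rw [List.dropWhile_cons_of_pos (by simp), ih2,
          List.filter_cons_of_neg (by simp)]
    · have hky : k < y := lt_of_le_of_ne (hk y List.mem_cons_self) (fun h => hyk h.symm)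
      have hnot : k ∉ y :: t := by
        intro hm
        rcases List.mem_cons.mp hm with h | h
        · exact hyk h.symm
        · exact absurd (hy k h) (not_le.mpr hky)
      refine ⟨?_, ?_⟩
      · rw [List.takeWhile_cons_of_neg (by simp [hyk]), List.count_eq_zero.mpr hnot]
        rfl
      · rw [List.dropWhile_cons_of_neg (by simp [hyk])]
        exact (List.filter_eq_self.mpr (fun z hz => by
          simp only [decide_eq_true_eq]
          exact fun hzk => hnot (hzk ▸ hz))).symm

lemma runScan_pairwise_aux : ∀ (n : Nat) (l : List (List Char)),
    l.length ≤ n → l.Pairwise (fun a b => a ≤ b) → runScan l = gs l := by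
  intro n
  induction n with
  | zero =>
    intro l h _
    rw [List.length_eq_zero_iff.mp (Nat.le_zero.mp h)]
    simp [runScan, gs]
  | succ n ih =>
    intro l hle hp
    match l with
    | [] => simp [runScan, gs]
    | k :: rest =>
      obtain ⟨hy, hp'⟩ := List.pairwise_cons.mp hp
      obtain ⟨h1, h2⟩ := takeWhile_dropWhile_sorted k rest hy hp'
      rw [runScan, gs]
      rw [h1, h2]
      rw [if_congr (show ((1 + ((rest.count k : Nat) : Int)) ≥ 2)
        ↔ (0 < rest.count k) from by omega) rfl rfl]
      congr 1
      have hlen' : (rest.filter (fun y => y ≠ k)).length ≤ n := by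
        have hf := List.length_filter_le (fun y => decide (y ≠ k)) rest
        simp only [List.length_cons] at hle
        omega
      exact ih _ hlen' (hp'.filter _)

lemma runScan_pairwise (l : List (List Char)) (hp : l.Pairwise (fun a b => a ≤ b)) :
    runScan l = gs l :=
  runScan_pairwise_aux l.length l le_rfl hp

lemma main_eq (xs : List (List Char)) :
    outerA (xs.map counterOf) = runScan (@PySem.List.sorted (List Char) (List Char)
      List.instLinearOrder.toLT LinearOrder.toDecidableLT (xs.map keyOf) (fun k => k) false) := by
  have hperm : (@PySem.List.sorted (List Char) (List Char)
      List.instLinearOrder.toLT LinearOrder.toDecidableLT (xs.map keyOf) (fun k => k) false).Perm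
      (xs.map keyOf) := @PySem.List.sorted_perm (List Char) (List Char)
        List.instLinearOrder.toLT LinearOrder.toDecidableLT (xs.map keyOf) (fun k => k) false
  have hpw : (@PySem.List.sorted (List Char) (List Char)
      List.instLinearOrder.toLT LinearOrder.toDecidableLT (xs.map keyOf) (fun k => k) false).Pairwise
      (fun a b => a ≤ b) := by
    simpa using @PySem.List.sorted_pairwise (List Char) (List Char) List.instLinearOrder
      (xs.map keyOf) (fun k => k)
  rw [outerA_map, runScan_pairwise _ hpw, gs_eq_N, gs_eq_N, N_perm _ _ hperm]

-- ===== VERDICT (by name: the statement is the Claim_ definition above) =====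
theorem solve_spec : Claim_equal_solve := by
  intro x ndummy _
  unfold Spec_solve solve solve_alt
  exact main_eq _
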